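-- pv_equiv track=rewrite | github.com/Ahmaad-dev/agentic-ai-mfg | Demo/smart-planning/runtime/identify_error_llm.py | normalize_field_name
-- ===== SOURCE A (Python) =====
-- def normalize_field_name(field_name):
--     """Convert common field name variations to camelCase"""
--     # Common field name mappings
--     field_mappings = {
--         "worker qualifications": "workerQualifications",
--         "work plans": "workPlans",
--         "customer order positions": "customerOrderPositions",
--         "packaging equipment compatibility": "packagingEquipmentCompatibility",
--         "demand id": "demandId",
--         "article id": "articleId",
--         "equipment key": "equipmentKey"
--     }
--
--     # Normalize: lowercase and trim
--     normalized = field_name.lower().strip()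
--
--     # Check if we have a mapping
--     if normalized in field_mappings:
--         return field_mappings[normalized]
--
--     # Fallback: remove spaces and convert to camelCase
--     words = normalized.split()
--     if len(words) > 1:
--         return words[0] + ''.join(word.capitalize() for word in words[1:])
--
--     return field_name
-- ===== SOURCE B (Python) =====
-- def normalize_field_name(field_name):
--     """Convert common field name variations to camelCase"""
--     # The mapping table of the original is redundant: every entry is exactly
--     # what the generic camelCase fallback produces, so B drops it entirely.
--     words = field_name.lower().strip().split()
--     if len(words) <= 1:
--         return field_name
--     return words[0] + ''.join(w.capitalize() for w in words[1:])
-- ===== Notes on version B (the rewrite author's own statement) =====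
-- stated objective: simpler
-- what changed: Drops the seven-entry field_mappings dictionary entirely (proved redundant: each entry equals what the generic camelCase fallback produces) and normalizes with a single lower/strip/split pass.
import Mathlib
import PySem

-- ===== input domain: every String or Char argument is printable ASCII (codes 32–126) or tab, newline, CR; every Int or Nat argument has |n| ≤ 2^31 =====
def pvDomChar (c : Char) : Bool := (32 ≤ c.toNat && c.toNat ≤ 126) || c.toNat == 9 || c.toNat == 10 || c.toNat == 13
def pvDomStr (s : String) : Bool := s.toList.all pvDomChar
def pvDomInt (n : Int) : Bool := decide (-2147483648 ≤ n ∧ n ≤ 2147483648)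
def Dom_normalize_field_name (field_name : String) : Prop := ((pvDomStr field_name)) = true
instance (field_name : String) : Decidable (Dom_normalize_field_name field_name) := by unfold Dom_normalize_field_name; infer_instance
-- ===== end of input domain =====

-- B drops A's redundant mapping table: every entry equals the camelCase fallback (proved below).
-- ===== PORT A =====
-- word.capitalize(): upper first char, lower the rest (exact for the ASCII domain)
def pyCapitalize (s : String) : String :=
  match s.toList with
  | [] => ""
  | c :: rest => String.ofList (PySem.Chars.upperChar c :: PySem.Chars.lower rest)

-- the literal field_mappings dict of A (hoisted to a named constant, unchanged)
def field_mappings : PySem.Dict String String := PySem.Dict.ofList [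
    ("worker qualifications", "workerQualifications"),
    ("work plans", "workPlans"),
    ("customer order positions", "customerOrderPositions"),
    ("packaging equipment compatibility", "packagingEquipmentCompatibility"),
    ("demand id", "demandId"),
    ("article id", "articleId"),
    ("equipment key", "equipmentKey")]

-- 'normalized'/'words' of the Python are written out inline (same values, computed where used)
def normalize_field_name (field_name : String) : String :=
  match field_mappings.get? (PySem.Str.strip (PySem.Str.lower field_name)) with
  | some v => v
  | none =>
    if (PySem.Str.split₀ (PySem.Str.strip (PySem.Str.lower field_name))).length > 1 then
      -- words[0] is safe here: words.length > 1
      (PySem.Str.split₀ (PySem.Str.strip (PySem.Str.lower field_name))).headD "" ++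
        PySem.Str.join ""
          (((PySem.Str.split₀ (PySem.Str.strip (PySem.Str.lower field_name))).drop 1).map pyCapitalize)
    else field_name

-- ===== PORT B =====
def normalize_field_name_alt (field_name : String) : String :=
  if (PySem.Str.split₀ (PySem.Str.strip (PySem.Str.lower field_name))).length ≤ 1 then field_name
  else
    (PySem.Str.split₀ (PySem.Str.strip (PySem.Str.lower field_name))).headD "" ++
      PySem.Str.join ""
        (((PySem.Str.split₀ (PySem.Str.strip (PySem.Str.lower field_name))).drop 1).map pyCapitalize)

-- ===== PRECONDITION & SPEC =====
def Spec_normalize_field_name (field_name : String) (out : String) : Prop := out = normalize_field_name_alt field_name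
instance (field_name : String) (out : String) : Decidable (Spec_normalize_field_name field_name out) := by unfold Spec_normalize_field_name; infer_instance

-- ===== CLAIM (what is proved, stated in full; the proofs are below) =====
def Claim_equal_normalize_field_name : Prop := ∀ (field_name : String), Dom_normalize_field_name field_name → Spec_normalize_field_name field_name (normalize_field_name field_name)

-- ===== LEMMAS AND PROOFS =====

lemma field_mappings_mk : field_mappings = PySem.Dict.mk [
    ("worker qualifications", "workerQualifications"),
    ("work plans", "workPlans"),
    ("customer order positions", "customerOrderPositions"),
    ("packaging equipment compatibility", "packagingEquipmentCompatibility"),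
    ("demand id", "demandId"),
    ("article id", "articleId"),
    ("equipment key", "equipmentKey")] := by decide

-- On each of the seven table keys the camelCase fallback reproduces the table value.
lemma table_redundant (k v : String) (h : field_mappings.get? k = some v) :
    v = (PySem.Str.split₀ k).headD "" ++
        PySem.Str.join "" (((PySem.Str.split₀ k).drop 1).map pyCapitalize) ∧
    (PySem.Str.split₀ k).length > 1 := by
  rw [field_mappings_mk] at h
  simp only [PySem.Dict.get?_mk_cons] at h
  split_ifs at h with h1 h2 h3 h4 h5 h6 h7
  · exact (beq_iff_eq.mp h1) ▸ (Option.some_inj.mp h) ▸ (by decide)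
  · exact (beq_iff_eq.mp h2) ▸ (Option.some_inj.mp h) ▸ (by decide)
  · exact (beq_iff_eq.mp h3) ▸ (Option.some_inj.mp h) ▸ (by decide)
  · exact (beq_iff_eq.mp h4) ▸ (Option.some_inj.mp h) ▸ (by decide)
  · exact (beq_iff_eq.mp h5) ▸ (Option.some_inj.mp h) ▸ (by decide)
  · exact (beq_iff_eq.mp h6) ▸ (Option.some_inj.mp h) ▸ (by decide)
  · exact (beq_iff_eq.mp h7) ▸ (Option.some_inj.mp h) ▸ (by decide)
  · simp [PySem.Dict.get?] at h

-- ===== VERDICT (by name: the statement is the Claim_ definition above) =====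
theorem normalize_field_name_spec : Claim_equal_normalize_field_name := by
  intro s _
  show normalize_field_name s = normalize_field_name_alt s
  rw [normalize_field_name.eq_def, normalize_field_name_alt.eq_def]
  cases hget : field_mappings.get? (PySem.Str.strip (PySem.Str.lower s)) with
  | none =>
      dsimp only
      split_ifs with h1 h2
      · omega
      · rfl
      · rfl
      · omega
  | some v =>
      obtain ⟨hv, hlen⟩ := table_redundant _ _ hget
      dsimp only
      rw [if_neg (by omega)]
      exact hv
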